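-- pv_equiv track=rewrite | github.com/rossi-jeff/python-games-fastapi | utilities/ten_grand.py | UsedThreeKind
-- ===== SOURCE A (Python) =====
-- from typing import List
--
-- def MapDieFaces(dice: List[int]):
--     dieMap = {}
--     for d in dice:
--         if not d in dieMap:
--             dieMap[d] = 0
--         dieMap[d] = dieMap[d] + 1
--     keys: List[int] = []
--     for k in dieMap.keys():
--         keys.append(k)
--     values: List[int] = []
--     for v in dieMap.values():
--         values.append(v)
--     return dieMap, keys, values
--
-- def UsedThreeKind(dice: List[int]):
--     used: List[int] = []
--     dieMap, keys, _ = MapDieFaces(dice)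
--     for k in keys:
--         if dieMap[k] == 3:
--             for idx in range(dieMap[k]):
--                 used.append(k)
--     return used
-- ===== SOURCE B (Python) =====
-- from typing import List
--
-- def UsedThreeKind(dice: List[int]):
--     used: List[int] = []
--     rest = dice
--     while rest:
--         head = rest[0]
--         same = [x for x in rest if x == head]
--         rest = [x for x in rest if x != head]
--         if len(same) == 3:
--             used += [head, head, head]
--     return used
-- ===== Notes on version B (the rewrite author's own statement) =====
-- stated objective: alternative
-- what changed: Replaces A's build-a-count-dict-then-scan-its-keys strategy with a repeated-partition worklist: a while loop that splits the remaining list into the occurrences of its first element and the rest, emitting the face three times when its group has size 3; no count table or key list is ever built.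
import Mathlib
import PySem

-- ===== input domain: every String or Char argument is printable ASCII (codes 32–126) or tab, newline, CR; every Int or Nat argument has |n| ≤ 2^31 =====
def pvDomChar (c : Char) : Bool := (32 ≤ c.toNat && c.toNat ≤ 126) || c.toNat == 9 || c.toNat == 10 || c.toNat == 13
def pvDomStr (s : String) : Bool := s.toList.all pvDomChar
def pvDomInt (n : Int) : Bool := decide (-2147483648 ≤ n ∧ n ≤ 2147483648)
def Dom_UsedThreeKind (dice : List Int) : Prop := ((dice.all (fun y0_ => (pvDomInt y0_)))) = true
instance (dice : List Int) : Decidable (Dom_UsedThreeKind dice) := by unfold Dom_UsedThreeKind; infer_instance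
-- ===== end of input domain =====

-- B replaces A's count-dict-then-scan-keys construction by a repeated-partition worklist loop
-- (split the remaining list on its first element, emit when the group has size 3); objective: alternative.


-- ===== PORT A =====
def MapDieFaces (dice : List Int) : PySem.Dict Int Int × List Int × List Int :=
  let dieMap : PySem.Dict Int Int := dice.foldl (fun m d =>
    let m1 := if m.contains d then m else m.insert d 0
    m1.insert d (m1.getD d 0 + 1)) PySem.Dict.empty
  let keys : List Int := dieMap.keys.foldl (fun acc k => acc ++ [k]) []
  let values : List Int := dieMap.values.foldl (fun acc v => acc ++ [v]) []
  (dieMap, keys, values)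

def UsedThreeKind (dice : List Int) : List Int :=
  let r := MapDieFaces dice
  let dieMap := r.1
  let keys := r.2.1
  keys.foldl (fun used k =>
    -- dieMap[k]: every k comes from dieMap's keys, so the lookup never raises; getD is exact here
    if dieMap.getD k 0 == 3 then
      (PySem.List.pyRange 0 (dieMap.getD k 0) 1).foldl (fun u _ => u ++ [k]) used
    else used) []

-- ===== PORT B =====
-- the while loop: state (used, rest); each pass partitions rest on its first element
def pvWhile (used rest : List Int) : List Int :=
  match rest with
  | [] => used
  | head :: tail =>
    let same := (head :: tail).filter (fun x => x == head)
    let rest' := (head :: tail).filter (fun x => !(x == head))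
    pvWhile (if same.length == 3 then used ++ [head, head, head] else used) rest'
termination_by rest.length
decreasing_by
  simp only [List.filter_cons, BEq.rfl, Bool.not_true, List.length_cons]
  exact Nat.lt_succ_of_le (List.length_filter_le _ _)

def UsedThreeKind_alt (dice : List Int) : List Int :=
  pvWhile [] dice

-- ===== PRECONDITION & SPEC =====
def Spec_UsedThreeKind (dice : List Int) (out : List Int) : Prop := out = UsedThreeKind_alt dice
instance (dice : List Int) (out : List Int) : Decidable (Spec_UsedThreeKind dice out) := by unfold Spec_UsedThreeKind; infer_instance

-- ===== CLAIM (what is proved, stated in full; the proofs are below) =====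
def Claim_equal_UsedThreeKind : Prop := ∀ (dice : List Int), Dom_UsedThreeKind dice → Spec_UsedThreeKind dice (UsedThreeKind dice)

-- ===== LEMMAS AND PROOFS =====

-- the common evaluation target: fold the emitter over the first occurrences
def pvEmit (dice : List Int) (u : List Int) (k : Int) : List Int :=
  if (PySem.List.count dice k : Int) == 3 then u ++ [k, k, k] else u

theorem pvCopy {α : Type} (l acc : List α) :
    l.foldl (fun a x => a ++ [x]) acc = acc ++ l := by
  induction l generalizing acc with
  | nil => simp
  | cons x xs ih => simp [List.foldl_cons, ih, List.append_assoc]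

theorem pvStepEq :
    (fun (m : PySem.Dict Int Int) d =>
      let m1 := if m.contains d then m else m.insert d 0
      m1.insert d (m1.getD d 0 + 1)) =
    fun (m : PySem.Dict Int Int) d => m.insert d (m.getD d 0 + 1) := by
  funext m d
  by_cases h : m.contains d = true
  · simp [h]
  · simp only [Bool.not_eq_true] at h
    simp [h, PySem.Dict.getD_insert_self, PySem.Dict.insert_insert_self,
      PySem.Dict.getD_of_not_contains]

theorem pvA_eq (dice : List Int) :
    UsedThreeKind dice = (PySem.List.dedup dice).foldl (pvEmit dice) [] := by
  unfold UsedThreeKind MapDieFaces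
  simp only [pvStepEq, PySem.Dict.foldl_insert_getD_add_one_eq_counter, pvCopy,
    List.nil_append, PySem.Dict.keys_counter]
  have hr : PySem.List.pyRange 0 3 1 = ([0, 1, 2] : List Int) := by decide
  have hf : (fun (used : List Int) (k : Int) =>
      if (PySem.Dict.counter dice).getD k 0 == 3 then
        (PySem.List.pyRange 0 ((PySem.Dict.counter dice).getD k 0) 1).foldl
          (fun u _ => u ++ [k]) used
      else used) = pvEmit dice := by
    funext used k
    rw [PySem.Dict.getD_counter]
    unfold pvEmit
    by_cases h : ((dice.count k : Int) == 3) = true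
    · have h3 : (dice.count k : Int) = 3 := beq_iff_eq.mp h
      simp [PySem.List.count_eq, h3, hr, List.foldl_cons, List.append_assoc]
    · simp [PySem.List.count_eq, h]
  rw [hf, PySem.List.dedup_eq_ofList]

-- pvEmit only appends: the accumulator factors out of the fold
theorem pvEmit_shift (c l : List Int) (u v : List Int) :
    l.foldl (pvEmit c) (u ++ v) = u ++ l.foldl (pvEmit c) v := by
  induction l generalizing v with
  | nil => simp
  | cons k ks ih =>
    simp only [List.foldl_cons]
    have h : pvEmit c (u ++ v) k = u ++ pvEmit c v k := by
      unfold pvEmit; split_ifs <;> simp [List.append_assoc]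
    rw [h, ih]

-- set(filter) = filter(set): first occurrences survive a filter
theorem pvOfList_filter (p : Int → Bool) (t : List Int) :
    PySem.Set.ofList (t.filter p) = (PySem.Set.ofList t).filter p := by
  induction t using List.reverseRecOn with
  | nil => simp
  | append_singleton t x ih =>
    rw [PySem.Set.ofList_append_singleton]
    by_cases hp : p x = true
    · rw [show (t ++ [x]).filter p = t.filter p ++ [x] from by simp [List.filter_append, hp],
        PySem.Set.ofList_append_singleton, ih]
      by_cases hx : x ∈ PySem.Set.ofList t
      · rw [PySem.Set.add_of_mem hx, PySem.Set.add_of_mem (List.mem_filter.mpr ⟨hx, hp⟩)]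
      · rw [PySem.Set.add_of_not_mem hx,
          PySem.Set.add_of_not_mem (fun h => hx (List.mem_filter.mp h).1), List.filter_append]
        simp [hp]
    · have hp' : p x = false := by simpa using hp
      rw [show (t ++ [x]).filter p = t.filter p from by simp [List.filter_append, hp'], ih]
      by_cases hx : x ∈ PySem.Set.ofList t
      · rw [PySem.Set.add_of_mem hx]
      · rw [PySem.Set.add_of_not_mem hx, List.filter_append]
        simp [hp']

-- the while loop computes the emitter fold over the first occurrences of its worklist
theorem pvWhile_eq (n : Nat) (rest : List Int) (hn : rest.length ≤ n) (used : List Int) :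
    pvWhile used rest = used ++ (PySem.Set.ofList rest).foldl (pvEmit rest) [] := by
  induction n generalizing rest used with
  | zero =>
    have h0 : rest = [] := List.eq_nil_of_length_eq_zero (Nat.le_zero.mp hn)
    subst h0; simp [pvWhile]
  | succ n ih =>
    match rest with
    | [] => simp [pvWhile]
    | head :: tail =>
      rw [pvWhile]
      have hrest' : (head :: tail).filter (fun x => !(x == head))
          = tail.filter (fun x => !(x == head)) := by
        simp
      have hlen : ((head :: tail).filter (fun x => !(x == head))).length ≤ n := by
        rw [hrest']
        have h1 := List.length_filter_le (fun x => !(x == head)) tail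
        have h2 := hn
        simp only [List.length_cons] at h2
        omega
      rw [ih _ hlen]
      rw [show PySem.Set.ofList (head :: tail)
            = head :: PySem.Set.discard (PySem.Set.ofList tail) head from
          PySem.Set.ofList_cons ..]
      rw [List.foldl_cons]
      rw [show (PySem.Set.discard (PySem.Set.ofList tail) head).foldl (pvEmit (head :: tail))
              (pvEmit (head :: tail) [] head)
            = pvEmit (head :: tail) [] head
              ++ (PySem.Set.discard (PySem.Set.ofList tail) head).foldl (pvEmit (head :: tail)) []
          from by simpa using pvEmit_shift (head :: tail) _ (pvEmit (head :: tail) [] head) []]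
      have hset : PySem.Set.ofList ((head :: tail).filter (fun x => !(x == head)))
          = PySem.Set.discard (PySem.Set.ofList tail) head := by
        rw [hrest', pvOfList_filter]; rfl
      rw [hset]
      have hfold : (PySem.Set.discard (PySem.Set.ofList tail) head).foldl
            (pvEmit ((head :: tail).filter (fun x => !(x == head)))) []
          = (PySem.Set.discard (PySem.Set.ofList tail) head).foldl (pvEmit (head :: tail)) [] := by
        apply PySem.List.foldl_congr_mem
        intro acc k hk
        have hkne : (k == head) = false := by
          have hm := (PySem.Set.mem_discard (PySem.Set.ofList tail) head k).mp hk
          simpa using hm.2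
        have hc : ((head :: tail).filter (fun x => !(x == head))).count k
            = (head :: tail).count k :=
          List.count_filter (by simp [hkne])
        unfold pvEmit
        rw [PySem.List.count_eq, PySem.List.count_eq, hc]
      rw [hfold]
      have hcount : ((head :: tail).filter (fun x => x == head)).length
          = (head :: tail).count head := by
        rw [List.count, List.countP_eq_length_filter]
      have hemit : pvEmit (head :: tail) [] head
          = if (((head :: tail).filter (fun x => x == head)).length == 3)
            then [head, head, head] else [] := by
        unfold pvEmit
        rw [PySem.List.count_eq, hcount]
        generalize (head :: tail).count head = m
        by_cases h3 : m = 3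
        · simp [h3]
        · have h3' : ¬((m : Int) = 3) := by omega
          simp [h3, h3']
      rw [hemit]
      cases hb : (((head :: tail).filter (fun x => x == head)).length == 3)
      · simp
      · simp [List.append_assoc]

theorem pvB_eq (dice : List Int) :
    UsedThreeKind_alt dice = (PySem.List.dedup dice).foldl (pvEmit dice) [] := by
  unfold UsedThreeKind_alt
  rw [pvWhile_eq dice.length dice (le_refl _), PySem.List.dedup_eq_ofList]
  simp

-- ===== VERDICT (by name: the statement is the Claim_ definition above) =====
theorem UsedThreeKind_spec : Claim_equal_UsedThreeKind := by
  intro dice _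
  unfold Spec_UsedThreeKind
  rw [pvA_eq, pvB_eq]
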